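-- pv_equiv track=rewrite | github.com/noualguill/Image-filter---Python | FINAL_PROJET_ATELIER.py | apply_LBP
-- ===== SOURCE A (Python) =====
-- def recup_matrice3x3(matrice,l,i,j):
-- 	for k in range(i-1,i+2):
-- 		for p in range(j-1,j+2):
-- 			l.append(matrice[k][p])
-- 	return(l)
--
-- def recup_matrice_REC(matrice,i,j):
-- 	return(recup_matrice3x3(matrice,[],i,j))
--
-- def somme(l,stock):
-- 	for i in range(0,len(l)):
-- 		if i==4:
-- 			stock=stock+0
-- 		else:
-- 			stock=stock+l[i]
-- 	return(stock)
--
-- def somme_REC(l):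
-- 	return(somme(l,0))
--
-- def LBP_calcul(l,acc,l2,stock):
-- 	for i in range(0,len(l)):
-- 		if i==4:
-- 			l2.append(l[i])
-- 		else:
-- 			res=l[i]-acc
-- 			if res<0:
-- 				l2.append(0)
-- 				stock=stock+1
-- 			else:
-- 				l2.append(1*(2**stock))
-- 				stock=stock+1
-- 	return(l2)
--
-- def LBP_calcul_rec(l):
-- 	return(LBP_calcul(l,l[4],[],0))
--
-- def LBP(l,i,j):
-- 	return(somme_REC(LBP_calcul_rec(recup_matrice_REC(l,i,j))))
--
-- def apply_LBP(matrice,matrice2):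
-- 	matrice2.append((matrice[0]))
-- 	for i in range(1,(len(matrice)-1)):
-- 		stock=1
-- 		lstock=[]
-- 		lstock.append(matrice[i][0])
-- 		while stock<(len(matrice[0])-1):
-- 			lstock.append((LBP(matrice,i,stock)))
-- 			stock=stock+1
-- 		lstock.append(matrice[i][-1])
-- 		matrice2.append(lstock)
-- 	matrice2.append((matrice[-1]))
-- 	return(matrice2)
-- ===== SOURCE B (Python) =====
-- def apply_LBP(matrice, matrice2):
--     matrice2.append(matrice[0])
--     for i in range(1, len(matrice) - 1):
--         row = [matrice[i][0]]
--         for j in range(1, len(matrice[0]) - 1):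
--             center = matrice[i][j]
--             val = 0
--             for di, dj, w in ((-1, -1, 1), (-1, 0, 2), (-1, 1, 4), (0, -1, 8),
--                               (0, 1, 16), (1, -1, 32), (1, 0, 64), (1, 1, 128)):
--                 if matrice[i + di][j + dj] >= center:
--                     val += w
--             row.append(val)
--         row.append(matrice[i][-1])
--         matrice2.append(row)
--     matrice2.append(matrice[-1])
--     return matrice2
-- ===== Notes on version B (the rewrite author's own statement) =====
-- stated objective: simpler
-- what changed: Replaced the chain of five helper functions (9-element neighborhood list, bit-list construction, then a summing pass that skips the center) by a single flat function that accumulates the weighted sum directly over a fixed ordered tuple of (di,dj,weight) offsets; no intermediate lists are built.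
import Mathlib
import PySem

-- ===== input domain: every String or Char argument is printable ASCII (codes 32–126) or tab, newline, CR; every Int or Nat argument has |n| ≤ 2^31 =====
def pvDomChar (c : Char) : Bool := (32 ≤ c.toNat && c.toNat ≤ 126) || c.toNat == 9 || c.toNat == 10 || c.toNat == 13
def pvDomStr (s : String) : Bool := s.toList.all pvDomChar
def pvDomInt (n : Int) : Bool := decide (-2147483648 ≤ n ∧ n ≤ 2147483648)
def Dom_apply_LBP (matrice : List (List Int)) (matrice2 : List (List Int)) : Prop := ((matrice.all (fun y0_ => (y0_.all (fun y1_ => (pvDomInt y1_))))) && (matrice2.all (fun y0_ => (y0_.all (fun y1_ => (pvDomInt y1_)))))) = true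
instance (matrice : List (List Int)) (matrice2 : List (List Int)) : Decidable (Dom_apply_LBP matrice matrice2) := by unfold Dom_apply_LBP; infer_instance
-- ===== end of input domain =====

-- B flattens A's five-helper pipeline into one direct weighted accumulation over fixed
-- (di,dj,weight) offsets; equivalence is about the RETURN value (both append to matrice2 alike).

-- ===== PORT A =====
-- matrice[k][p] with both indexes in range under Pre_; out-of-range yields the getD default (Python raises there)
def pvGetIJ (matrice : List (List Int)) (k p : Int) : Int :=
  (PySem.List.pyGet? ((PySem.List.pyGet? matrice k).getD []) p).getD 0

def recup_matrice3x3 (matrice : List (List Int)) (l : List Int) (i j : Int) : List Int :=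
  (PySem.List.pyRange (i-1) (i+2) 1).foldl (fun acc k =>
    (PySem.List.pyRange (j-1) (j+2) 1).foldl (fun acc2 p =>
      acc2 ++ [pvGetIJ matrice k p]) acc) l

def recup_matrice_REC (matrice : List (List Int)) (i j : Int) : List Int :=
  recup_matrice3x3 matrice [] i j

def somme (l : List Int) (stock : Int) : Int :=
  (PySem.List.pyRange 0 (l.length : Int) 1).foldl
    (fun s i => if i == 4 then s + 0 else s + ((PySem.List.pyGet? l i).getD 0)) stock

def somme_REC (l : List Int) : Int := somme l 0

def LBP_calcul (l : List Int) (acc : Int) (l2 : List Int) (stock : Int) : List Int :=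
  ((PySem.List.pyRange 0 (l.length : Int) 1).foldl
    (fun (st : List Int × Int) i =>
      if i == 4 then (st.1 ++ [(PySem.List.pyGet? l i).getD 0], st.2)
      else
        let res := (PySem.List.pyGet? l i).getD 0 - acc
        (st.1 ++ [if res < 0 then 0 else 1 * 2 ^ st.2.toNat], st.2 + 1))
    (l2, stock)).1

def LBP_calcul_rec (l : List Int) : List Int :=
  LBP_calcul l ((PySem.List.pyGet? l 4).getD 0) [] 0

def LBP (l : List (List Int)) (i j : Int) : Int :=
  somme_REC (LBP_calcul_rec (recup_matrice_REC l i j))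

-- the 'while stock < len(matrice[0])-1' loop of apply_LBP
def lbpWhile (matrice : List (List Int)) (i : Int) (stock bound : Int) (lstock : List Int) : List Int :=
  if _h : stock < bound then
    lbpWhile matrice i (stock + 1) bound (lstock ++ [LBP matrice i stock])
  else lstock
termination_by (bound - stock).toNat
decreasing_by omega

def apply_LBP (matrice : List (List Int)) (matrice2 : List (List Int)) : List (List Int) :=
  let m2 := matrice2 ++ [(PySem.List.pyGet? matrice 0).getD []]
  let m2 := (PySem.List.pyRange 1 ((matrice.length : Int) - 1) 1).foldl
    (fun m2 i =>
      let row := (PySem.List.pyGet? matrice i).getD []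
      let lstock := [(PySem.List.pyGet? row 0).getD 0]
      let lstock := lbpWhile matrice i 1 (((((PySem.List.pyGet? matrice 0).getD []).length : Int)) - 1) lstock
      m2 ++ [lstock ++ [(PySem.List.pyGet? row (-1)).getD 0]]) m2
  m2 ++ [(PySem.List.pyGet? matrice (-1)).getD []]

-- ===== PORT B =====
def pvOffsets : List (Int × Int × Int) :=
  [(-1,-1,1),(-1,0,2),(-1,1,4),(0,-1,8),(0,1,16),(1,-1,32),(1,0,64),(1,1,128)]

def apply_LBP_alt (matrice : List (List Int)) (matrice2 : List (List Int)) : List (List Int) :=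
  let m2 := matrice2 ++ [(PySem.List.pyGet? matrice 0).getD []]
  let m2 := (PySem.List.pyRange 1 ((matrice.length : Int) - 1) 1).foldl
    (fun m2 i =>
      let row := (PySem.List.pyGet? matrice i).getD []
      let inner := (PySem.List.pyRange 1 (((((PySem.List.pyGet? matrice 0).getD []).length : Int)) - 1) 1).foldl
        (fun r j =>
          let center := (PySem.List.pyGet? row j).getD 0
          let val := pvOffsets.foldl
            (fun v o =>
              if ((PySem.List.pyGet? ((PySem.List.pyGet? matrice (i + o.1)).getD []) (j + o.2.1)).getD 0) ≥ center
              then v + o.2.2 else v) 0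
          r ++ [val]) [(PySem.List.pyGet? row 0).getD 0]
      m2 ++ [inner ++ [(PySem.List.pyGet? row (-1)).getD 0]]) m2
  m2 ++ [(PySem.List.pyGet? matrice (-1)).getD []]

-- ===== PRECONDITION & SPEC =====
-- Exactly the inputs on which the Python A returns: matrice nonempty, every interior row
-- nonempty (matrice[i][0] / matrice[i][-1]), and when there are both interior rows and
-- interior columns every row is at least as long as matrice[0] (the 3x3 neighbor fetches).
def Pre_apply_LBP (matrice : List (List Int)) (matrice2 : List (List Int)) : Prop :=
  matrice ≠ [] ∧
  (∀ i < matrice.length, 1 ≤ i → i + 1 < matrice.length → matrice.getD i [] ≠ []) ∧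
  (3 ≤ matrice.length → 3 ≤ (matrice.headD []).length →
    ∀ r ∈ matrice, (matrice.headD []).length ≤ r.length)
instance (matrice : List (List Int)) (matrice2 : List (List Int)) : Decidable (Pre_apply_LBP matrice matrice2) := by unfold Pre_apply_LBP; infer_instance

def pvWitness_apply_LBP : List (List Int) × List (List Int) :=
  ([[1,2,3],[4,5,6],[7,8,9]], [])

def Spec_apply_LBP (matrice : List (List Int)) (matrice2 : List (List Int)) (out : List (List Int)) : Prop := out = apply_LBP_alt matrice matrice2
instance (matrice : List (List Int)) (matrice2 : List (List Int)) (out : List (List Int)) : Decidable (Spec_apply_LBP matrice matrice2 out) := by unfold Spec_apply_LBP; infer_instance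

-- ===== CLAIM (what is proved, stated in full; the proofs are below) =====
def Claim_equal_apply_LBP : Prop := ∀ (matrice : List (List Int)) (matrice2 : List (List Int)), Dom_apply_LBP matrice matrice2 → Pre_apply_LBP matrice matrice2 → Spec_apply_LBP matrice matrice2 (apply_LBP matrice matrice2)

-- ===== LEMMAS AND PROOFS =====

-- range(a-1, a+2) is the three indexes a-1, a, a+1
theorem pyRange3 (a : Int) : PySem.List.pyRange (a-1) (a+2) 1 = [a-1, a, a+1] := by
  rw [PySem.List.pyRange_one_cons (by omega), PySem.List.pyRange_one_cons (by omega),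
      PySem.List.pyRange_one_cons (by omega), PySem.List.pyRange_one_eq_nil (by omega)]
  norm_num

-- A's bit-list-then-sum pipeline on an arbitrary 9-element neighborhood, as a closed sum
theorem pipeline_eq (n0 n1 n2 n3 c n5 n6 n7 n8 : Int) :
    somme_REC (LBP_calcul_rec [n0, n1, n2, n3, c, n5, n6, n7, n8]) =
      (if c ≤ n0 then (1:Int) else 0) + (if c ≤ n1 then 2 else 0) + (if c ≤ n2 then 4 else 0) +
      (if c ≤ n3 then 8 else 0) + (if c ≤ n5 then 16 else 0) + (if c ≤ n6 then 32 else 0) +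
      (if c ≤ n7 then 64 else 0) + (if c ≤ n8 then 128 else 0) := by
  have hbit : ∀ g w : Int, (if g < c then (0:Int) else w) = if c ≤ g then w else 0 := by
    intro g w; split_ifs <;> omega
  have h09 : PySem.List.pyRange (0:Int) 9 1 = [0,1,2,3,4,5,6,7,8] := by decide
  simp only [somme_REC, LBP_calcul_rec, LBP_calcul, somme]
  norm_num [h09, List.foldl_cons, List.foldl_nil, PySem.List.pyGet?, PySem.List.pyIdx?,
    show Int.toNat 2 = 2 from rfl, show Int.toNat 3 = 3 from rfl, show Int.toNat 4 = 4 from rfl,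
    show Int.toNat 5 = 5 from rfl, show Int.toNat 6 = 6 from rfl, show Int.toNat 7 = 7 from rfl,
    show Int.toNat 8 = 8 from rfl, hbit]
  try ring

-- the while loop is a left fold over range(stock, bound)
theorem lbpWhile_eq (matrice : List (List Int)) (i bound : Int) :
    ∀ (stock : Int) (lstock : List Int),
      lbpWhile matrice i stock bound lstock =
        (PySem.List.pyRange stock bound 1).foldl (fun r j => r ++ [LBP matrice i j]) lstock := by
  suffices H : ∀ n : Nat, ∀ (stock : Int) (lstock : List Int), (bound - stock).toNat = n →
      lbpWhile matrice i stock bound lstock =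
        (PySem.List.pyRange stock bound 1).foldl (fun r j => r ++ [LBP matrice i j]) lstock by
    intro s l; exact H _ s l rfl
  intro n
  induction n with
  | zero =>
    intro s l h
    rw [lbpWhile, dif_neg (by omega), PySem.List.pyRange_one_eq_nil (by omega)]
    rfl
  | succ n ih =>
    intro s l h
    by_cases hs : s < bound
    · rw [lbpWhile, dif_pos hs, ih (s + 1) _ (by omega), PySem.List.pyRange_one_cons hs]
      rfl
    · rw [lbpWhile, dif_neg hs, PySem.List.pyRange_one_eq_nil (by omega)]
      rfl

-- pointwise: A's five-helper pipeline equals B's direct weighted accumulation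
theorem LBP_eq (matrice : List (List Int)) (i j : Int) :
    LBP matrice i j =
      pvOffsets.foldl
        (fun v o =>
          if ((PySem.List.pyGet? ((PySem.List.pyGet? matrice (i + o.1)).getD []) (j + o.2.1)).getD 0) ≥
             ((PySem.List.pyGet? ((PySem.List.pyGet? matrice i).getD []) j).getD 0)
          then v + o.2.2 else v) 0 := by
  have haux : ∀ (v w : Int) (b : Prop) (_ : Decidable b),
      (if b then v + w else v) = v + (if b then w else 0) := by
    intro v w b hb; split_ifs <;> omega
  have hm1 : ∀ a : Int, a + -1 = a - 1 := fun a => by ring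
  unfold LBP recup_matrice_REC recup_matrice3x3
  simp only [pyRange3, List.foldl_cons, List.foldl_nil, List.nil_append, List.cons_append,
    pvGetIJ]
  rw [pipeline_eq]
  simp only [pvOffsets, List.foldl_cons, List.foldl_nil, haux, ge_iff_le, zero_add,
    hm1, add_zero]

theorem apply_LBP_eq_alt (matrice : List (List Int)) (matrice2 : List (List Int)) :
    apply_LBP matrice matrice2 = apply_LBP_alt matrice matrice2 := by
  unfold apply_LBP apply_LBP_alt
  simp only [lbpWhile_eq, LBP_eq]

-- ===== VERDICT (by name: the statement is the Claim_ definition above) =====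
theorem apply_LBP_spec : Claim_equal_apply_LBP := by
  intro m m2 _ _
  unfold Spec_apply_LBP
  exact apply_LBP_eq_alt m m2
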